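-- pv_equiv track=rewrite | github.com/Skinz1434/CipherRecon | text_transforms.py | to_unicode_circled
-- ===== SOURCE A (Python) =====
-- def to_unicode_circled(text: str) -> str:
--     """Convert text to unicode circled characters"""
--     if not text:
--         return ""
--     # Map for circled text
--     circled_map = {
--         'a': '🅐', 'b': '🅑', 'c': '🅒', 'd': '🅓', 'e': '🅔', 'f': '🅕', 'g': '🅖', 'h': '🅗', 'i': '🅘',
--         'j': '🅙', 'k': '🅚', 'l': '🅛', 'm': '🅜', 'n': '🅝', 'o': '🅞', 'p': '🅟', 'q': '🅠', 'r': '🅡',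
--         's': '🅢', 't': '🅣', 'u': '🅤', 'v': '🅥', 'w': '🅦', 'x': '🅧', 'y': '🅨', 'z': '🅩',
--         'A': '🅐', 'B': '🅑', 'C': '🅒', 'D': '🅓', 'E': '🅔', 'F': '🅕', 'G': '🅖', 'H': '🅗', 'I': '🅘',
--         'J': '🅙', 'K': '🅚', 'L': '🅛', 'M': '🅜', 'N': '🅝', 'O': '🅞', 'P': '🅟', 'Q': '🅠', 'R': '🅡',
--         'S': '🅢', 'T': '🅣', 'U': '🅤', 'V': '🅥', 'W': '🅦', 'X': '🅧', 'Y': '🅨', 'Z': '🅩',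
--         '0': '⓪', '1': '①', '2': '②', '3': '③', '4': '④', '5': '⑤', '6': '⑥', '7': '⑦', '8': '⑧', '9': '⑨',
--         ' ': ' '
--     }
--     return ''.join(circled_map.get(c, c) for c in text)
-- ===== SOURCE B (Python) =====
-- def to_unicode_circled(text: str) -> str:
--     """Convert text to unicode circled characters (arithmetic code-point mapping)."""
--     def circ(c):
--         o = ord(c)
--         if 65 <= o <= 90:
--             return chr(0x1F150 + o - 65)
--         if 97 <= o <= 122:
--             return chr(0x1F150 + o - 97)
--         if 49 <= o <= 57:
--             return chr(0x2460 + o - 49)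
--         if o == 48:
--             return '\u24ea'
--         return c
--     return ''.join(circ(c) for c in text)
-- ===== Notes on version B (the rewrite author's own statement) =====
-- stated objective: idiomatic
-- what changed: Replaced the 63-entry literal lookup table by an arithmetic classification on the code point (letters via 0x1F150 + offset collapsing both cases, digits 1-9 via 0x2460 + offset, '0' as U+24EA, everything else unchanged).
import Mathlib
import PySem

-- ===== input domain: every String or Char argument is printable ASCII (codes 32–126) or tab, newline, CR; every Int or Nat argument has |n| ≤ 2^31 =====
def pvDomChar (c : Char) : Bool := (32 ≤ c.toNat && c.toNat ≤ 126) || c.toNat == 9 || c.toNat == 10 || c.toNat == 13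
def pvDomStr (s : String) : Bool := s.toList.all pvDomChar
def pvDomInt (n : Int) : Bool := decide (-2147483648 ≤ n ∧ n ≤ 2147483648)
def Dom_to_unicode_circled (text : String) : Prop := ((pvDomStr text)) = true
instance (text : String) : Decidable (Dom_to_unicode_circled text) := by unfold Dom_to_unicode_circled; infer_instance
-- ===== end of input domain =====

-- B replaces A's 63-entry lookup table by an arithmetic classification of the code point (idiomatic; same cost).

-- ===== PORT A =====
def pvCircledMap : PySem.Dict Char String := PySem.Dict.ofList [('a', "🅐"), ('b', "🅑"), ('c', "🅒"), ('d', "🅓"), ('e', "🅔"), ('f', "🅕"), ('g', "🅖"), ('h', "🅗"), ('i', "🅘"), ('j', "🅙"), ('k', "🅚"), ('l', "🅛"), ('m', "🅜"), ('n', "🅝"), ('o', "🅞"), ('p', "🅟"), ('q', "🅠"), ('r', "🅡"), ('s', "🅢"), ('t', "🅣"), ('u', "🅤"), ('v', "🅥"), ('w', "🅦"), ('x', "🅧"), ('y', "🅨"), ('z', "🅩"), ('A', "🅐"), ('B', "🅑"), ('C', "🅒"), ('D', "🅓"), ('E', "🅔"), ('F', "🅕"), ('G', "🅖"), ('H', "🅗"),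 ('I', "🅘"), ('J', "🅙"), ('K', "🅚"), ('L', "🅛"), ('M', "🅜"), ('N', "🅝"), ('O', "🅞"), ('P', "🅟"), ('Q', "🅠"), ('R', "🅡"), ('S', "🅢"), ('T', "🅣"), ('U', "🅤"), ('V', "🅥"), ('W', "🅦"), ('X', "🅧"), ('Y', "🅨"), ('Z', "🅩"), ('0', "⓪"), ('1', "①"), ('2', "②"), ('3', "③"), ('4', "④"), ('5', "⑤"), ('6', "⑥"), ('7', "⑦"), ('8', "⑧"), ('9', "⑨"), (' ', " ")]

def to_unicode_circled (text : String) : String :=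
  if text = "" then ""
  else PySem.Str.join "" (text.toList.map (fun c => (pvCircledMap.get? c).getD (String.ofList [c])))

-- ===== PORT B =====
def pvCircChar (c : Char) : Char :=
  let o := c.toNat
  if 65 ≤ o ∧ o ≤ 90 then Char.ofNat (0x1F150 + o - 65)
  else if 97 ≤ o ∧ o ≤ 122 then Char.ofNat (0x1F150 + o - 97)
  else if 49 ≤ o ∧ o ≤ 57 then Char.ofNat (0x2460 + o - 49)
  else if o = 48 then Char.ofNat 0x24EA
  else c

def to_unicode_circled_alt (text : String) : String :=
  PySem.Str.join "" (text.toList.map (fun c => String.ofList [pvCircChar c]))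

-- ===== PRECONDITION & SPEC =====
def Spec_to_unicode_circled (text : String) (out : String) : Prop := out = to_unicode_circled_alt text
instance (text : String) (out : String) : Decidable (Spec_to_unicode_circled text out) := by unfold Spec_to_unicode_circled; infer_instance

-- ===== CLAIM (what is proved, stated in full; the proofs are below) =====
def Claim_equal_to_unicode_circled : Prop := ∀ (text : String), Dom_to_unicode_circled text → Spec_to_unicode_circled text (to_unicode_circled text)

-- ===== LEMMAS AND PROOFS =====

-- per-character agreement of the two mappings, for every code point in the ASCII domain
set_option maxRecDepth 4096 in
theorem pvCircAgree : ∀ n : Nat, n < 127 →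
    (pvCircledMap.get? (Char.ofNat n)).getD (String.ofList [Char.ofNat n])
      = String.ofList [pvCircChar (Char.ofNat n)] := by
  decide

theorem pvCircAgreeChar (c : Char) (h : pvDomChar c = true) :
    (pvCircledMap.get? c).getD (String.ofList [c]) = String.ofList [pvCircChar c] := by
  have hle : c.toNat < 127 := by
    simp only [pvDomChar, Bool.or_eq_true, Bool.and_eq_true, decide_eq_true_eq, beq_iff_eq] at h
    omega
  have := pvCircAgree c.toNat hle
  simpa using this

-- ===== VERDICT (by name: the statement is the Claim_ definition above) =====
theorem to_unicode_circled_spec : Claim_equal_to_unicode_circled := by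
  intro text hdom
  unfold Spec_to_unicode_circled to_unicode_circled to_unicode_circled_alt
  have hall : ∀ c ∈ text.toList, pvDomChar c = true := by
    simpa [Dom_to_unicode_circled, pvDomStr, List.all_eq_true] using hdom
  by_cases he : text = ""
  · subst he; rfl
  · simp only [he, if_false]
    rw [List.map_congr_left fun c hc => pvCircAgreeChar c (hall c hc)]
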